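-- pv_equiv track=rewrite | github.com/mohit2023/Automated-Nurse-Rostering-System | A2.py | generate_nonConflict_nurse
-- ===== SOURCE A (Python) =====
-- def generate_nonConflict_nurse(nurse,N,m,a,e):
--     result = ['R' for j in range(N)]
--     count = 0
--     for j in range(N):
--         if(nurse[j]=='A' or nurse[j]=='R' and count<m):
--             result[j] = 'M'
--             count = count+1
--     count_e = 0
--     count_a = 0
--     for j in range(N):
--         if(result[j]=='R'):
--             if(count_e<e):
--                 result[j] = 'E'
--                 count_e = count_e+1
--             elif(count_a<a):
--                 result[j] = 'A'
--                 count_a = count_a+1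
--     return result
-- ===== SOURCE B (Python) =====
-- def generate_nonConflict_nurse(nurse, N, m, a, e):
--     # Single fused pass: decide each slot immediately, appending to the output,
--     # maintaining the M / E / A quota counters together.
--     result = []
--     count = 0
--     count_e = 0
--     count_a = 0
--     for j in range(N):
--         c = nurse[j]
--         if c == 'A' or (c == 'R' and count < m):
--             result.append('M')
--             count += 1
--         elif count_e < e:
--             result.append('E')
--             count_e += 1
--         elif count_a < a:
--             result.append('A')
--             count_a += 1
--         else:
--             result.append('R')
--     return result
-- ===== Notes on version B (the rewrite author's own statement) =====
-- stated objective: simpler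
-- what changed: Replaces A's pre-filled 'R' array and two sequential index-mutating passes (mark 'M' slots, then rewrite leftover 'R' slots to 'E'/'A') by one fused left-to-right pass that appends each slot's final letter directly while maintaining the three quota counters together.
import Mathlib
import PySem

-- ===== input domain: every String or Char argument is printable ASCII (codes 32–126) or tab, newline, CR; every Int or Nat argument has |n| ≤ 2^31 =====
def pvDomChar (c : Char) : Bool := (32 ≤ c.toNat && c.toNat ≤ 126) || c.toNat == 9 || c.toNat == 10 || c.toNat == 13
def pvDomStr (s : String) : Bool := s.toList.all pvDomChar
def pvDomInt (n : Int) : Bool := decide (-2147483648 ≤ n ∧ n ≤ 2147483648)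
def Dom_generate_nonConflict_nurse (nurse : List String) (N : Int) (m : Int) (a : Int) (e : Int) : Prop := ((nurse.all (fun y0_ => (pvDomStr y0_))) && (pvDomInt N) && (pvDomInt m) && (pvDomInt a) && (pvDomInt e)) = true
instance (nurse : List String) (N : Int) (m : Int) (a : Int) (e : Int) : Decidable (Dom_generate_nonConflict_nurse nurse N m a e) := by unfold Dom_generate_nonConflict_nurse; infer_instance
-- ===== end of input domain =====

-- B fuses A's two index-mutating passes over a pre-filled 'R' array into one
-- appending pass maintaining the three quota counters together (objective: simpler).


-- ===== PORT A =====
def generate_nonConflict_nurse (nurse : List String) (N : Int) (m : Int) (a : Int) (e : Int) : List String :=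
  -- result = ['R' for j in range(N)]
  let result : List String := (PySem.List.pyRange 0 N).map (fun _ => "R")
  -- first pass: mark 'M'
  let s1 := (PySem.List.pyRange 0 N).foldl (fun (st : List String × Int) j =>
      if PySem.List.pyGetD nurse j "" == "A" || (PySem.List.pyGetD nurse j "" == "R" && decide (st.2 < m)) then
        (PySem.List.pySetD st.1 j "M", st.2 + 1)
      else st) (result, 0)
  -- second pass: rewrite leftover 'R' to 'E' / 'A'
  let s2 := (PySem.List.pyRange 0 N).foldl (fun (st : List String × Int × Int) j =>
      if PySem.List.pyGetD st.1 j "" == "R" then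
        if st.2.1 < e then (PySem.List.pySetD st.1 j "E", st.2.1 + 1, st.2.2)
        else if st.2.2 < a then (PySem.List.pySetD st.1 j "A", st.2.1, st.2.2 + 1)
        else st
      else st) (s1.1, 0, 0)
  s2.1

-- ===== PORT B =====
def generate_nonConflict_nurse_alt (nurse : List String) (N : Int) (m : Int) (a : Int) (e : Int) : List String :=
  -- single fused pass, state (result, count, count_e, count_a)
  let s := (PySem.List.pyRange 0 N).foldl (fun (st : List String × Int × Int × Int) j =>
      let c := PySem.List.pyGetD nurse j ""
      if c == "A" || (c == "R" && decide (st.2.1 < m)) then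
        (st.1 ++ ["M"], st.2.1 + 1, st.2.2.1, st.2.2.2)
      else if st.2.2.1 < e then (st.1 ++ ["E"], st.2.1, st.2.2.1 + 1, st.2.2.2)
      else if st.2.2.2 < a then (st.1 ++ ["A"], st.2.1, st.2.2.1, st.2.2.2 + 1)
      else (st.1 ++ ["R"], st.2.1, st.2.2.1, st.2.2.2)) ([], 0, 0, 0)
  s.1

-- ===== PRECONDITION & SPEC =====
-- Python A evaluates nurse[j] for every j in range(N): it raises IndexError iff N > len(nurse).
def Pre_generate_nonConflict_nurse (nurse : List String) (N : Int) (m : Int) (a : Int) (e : Int) : Prop :=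
  N ≤ (nurse.length : Int)
instance (nurse : List String) (N : Int) (m : Int) (a : Int) (e : Int) : Decidable (Pre_generate_nonConflict_nurse nurse N m a e) := by unfold Pre_generate_nonConflict_nurse; infer_instance

def pvWitness_generate_nonConflict_nurse : List String × Int × Int × Int × Int :=
  (["A", "R", "R", "E", "R"], 5, 2, 1, 1)

def Spec_generate_nonConflict_nurse (nurse : List String) (N : Int) (m : Int) (a : Int) (e : Int) (out : List String) : Prop := out = generate_nonConflict_nurse_alt nurse N m a e
instance (nurse : List String) (N : Int) (m : Int) (a : Int) (e : Int) (out : List String) : Decidable (Spec_generate_nonConflict_nurse nurse N m a e out) := by unfold Spec_generate_nonConflict_nurse; infer_instance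

-- ===== CLAIM (what is proved, stated in full; the proofs are below) =====
def Claim_equal_generate_nonConflict_nurse : Prop := ∀ (nurse : List String) (N : Int) (m : Int) (a : Int) (e : Int), Dom_generate_nonConflict_nurse nurse N m a e → Pre_generate_nonConflict_nurse nurse N m a e → Spec_generate_nonConflict_nurse nurse N m a e (generate_nonConflict_nurse nurse N m a e)

-- ===== LEMMAS AND PROOFS =====

-- The per-slot first-pass condition, at index j with current M-count c.
def pvCond (nurse : List String) (m : Int) (j : Nat) (c : Int) : Bool :=
  nurse.getD j "" == "A" || (nurse.getD j "" == "R" && decide (c < m))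

-- Reference single-pass recursion (B's semantics on Nat prefix length):
-- state (result, count, count_e, count_a) after the first k slots.
def pvSpecGo (nurse : List String) (m a e : Int) : Nat → List String × Int × Int × Int
  | 0 => ([], 0, 0, 0)
  | k+1 =>
    if pvCond nurse m k (pvSpecGo nurse m a e k).2.1 then
      ((pvSpecGo nurse m a e k).1 ++ ["M"], (pvSpecGo nurse m a e k).2.1 + 1,
       (pvSpecGo nurse m a e k).2.2.1, (pvSpecGo nurse m a e k).2.2.2)
    else if (pvSpecGo nurse m a e k).2.2.1 < e then
      ((pvSpecGo nurse m a e k).1 ++ ["E"], (pvSpecGo nurse m a e k).2.1,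
       (pvSpecGo nurse m a e k).2.2.1 + 1, (pvSpecGo nurse m a e k).2.2.2)
    else if (pvSpecGo nurse m a e k).2.2.2 < a then
      ((pvSpecGo nurse m a e k).1 ++ ["A"], (pvSpecGo nurse m a e k).2.1,
       (pvSpecGo nurse m a e k).2.2.1, (pvSpecGo nurse m a e k).2.2.2 + 1)
    else
      ((pvSpecGo nurse m a e k).1 ++ ["R"], (pvSpecGo nurse m a e k).2.1,
       (pvSpecGo nurse m a e k).2.2.1, (pvSpecGo nurse m a e k).2.2.2)

-- whether slot j ends up 'M' (depends only on nurse, m, j)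
def pvCondB (nurse : List String) (m : Int) (j : Nat) : Bool :=
  pvCond nurse m j (pvSpecGo nurse m 0 0 j).2.1

lemma pvSpecGo_count_indep (nurse : List String) (m a e a' e' : Int) (k : Nat) :
    (pvSpecGo nurse m a e k).2.1 = (pvSpecGo nurse m a' e' k).2.1 := by
  induction k with
  | zero => rfl
  | succ k ih =>
    simp only [pvSpecGo, ih]
    split_ifs <;> simp

lemma pvSpecGo_len (nurse : List String) (m a e : Int) (k : Nat) :
    (pvSpecGo nurse m a e k).1.length = k := by
  induction k with
  | zero => rfl
  | succ k ih => simp only [pvSpecGo]; split_ifs <;> simp [ih]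

lemma pvSpecGo_succ (nurse : List String) (m a e : Int) (k : Nat) :
    pvSpecGo nurse m a e (k+1)
    = (if pvCondB nurse m k = true then
        ((pvSpecGo nurse m a e k).1 ++ ["M"], (pvSpecGo nurse m a e k).2.1 + 1,
         (pvSpecGo nurse m a e k).2.2.1, (pvSpecGo nurse m a e k).2.2.2)
      else if (pvSpecGo nurse m a e k).2.2.1 < e then
        ((pvSpecGo nurse m a e k).1 ++ ["E"], (pvSpecGo nurse m a e k).2.1,
         (pvSpecGo nurse m a e k).2.2.1 + 1, (pvSpecGo nurse m a e k).2.2.2)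
      else if (pvSpecGo nurse m a e k).2.2.2 < a then
        ((pvSpecGo nurse m a e k).1 ++ ["A"], (pvSpecGo nurse m a e k).2.1,
         (pvSpecGo nurse m a e k).2.2.1, (pvSpecGo nurse m a e k).2.2.2 + 1)
      else
        ((pvSpecGo nurse m a e k).1 ++ ["R"], (pvSpecGo nurse m a e k).2.1,
         (pvSpecGo nurse m a e k).2.2.1, (pvSpecGo nurse m a e k).2.2.2)) := by
  have hcnt := pvSpecGo_count_indep nurse m a e 0 0 k
  simp only [pvSpecGo, pvCondB, hcnt]

lemma pv_set_append_len {α : Type} (l1 : List α) (x : α) (l2 : List α) (v : α) :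
    (l1 ++ x :: l2).set l1.length v = l1 ++ v :: l2 := by
  induction l1 with
  | nil => rfl
  | cons y t ih => simp [ih]

-- B's fold equals the reference recursion.
lemma pvB_eq (nurse : List String) (m a e : Int) (k : Nat) :
    (List.range k).foldl (fun (st : List String × Int × Int × Int) (j : Nat) =>
      if nurse.getD j "" == "A" || (nurse.getD j "" == "R" && decide (st.2.1 < m)) then
        (st.1 ++ ["M"], st.2.1 + 1, st.2.2.1, st.2.2.2)
      else if st.2.2.1 < e then (st.1 ++ ["E"], st.2.1, st.2.2.1 + 1, st.2.2.2)
      else if st.2.2.2 < a then (st.1 ++ ["A"], st.2.1, st.2.2.1, st.2.2.2 + 1)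
      else (st.1 ++ ["R"], st.2.1, st.2.2.1, st.2.2.2)) ([], 0, 0, 0)
    = pvSpecGo nurse m a e k := by
  induction k with
  | zero => rfl
  | succ k ih =>
    rw [List.range_succ, List.foldl_append, ih]
    simp only [List.foldl_cons, List.foldl_nil, pvSpecGo, pvCond]
    rfl

-- A's first pass: intermediate result and count after k steps.
lemma pvA1 (nurse : List String) (m a e : Int) (n k : Nat) (hk : k ≤ n) :
    (List.range k).foldl (fun (st : List String × Int) (j : Nat) =>
      if nurse.getD j "" == "A" || (nurse.getD j "" == "R" && decide (st.2 < m)) then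
        (st.1.set j "M", st.2 + 1)
      else st) ((List.range n).map (fun _ => "R"), 0)
    = ((List.range n).map (fun j => if j < k ∧ pvCondB nurse m j = true then "M" else "R"),
       (pvSpecGo nurse m a e k).2.1) := by
  induction k with
  | zero => simp [pvSpecGo]
  | succ k ih =>
    rw [List.range_succ, List.foldl_append, ih (by omega)]
    simp only [List.foldl_cons, List.foldl_nil]
    have hcnt := pvSpecGo_count_indep nurse m a e 0 0 k
    have hcond : (nurse.getD k "" == "A" || (nurse.getD k "" == "R" && decide ((pvSpecGo nurse m a e k).2.1 < m)))
        = pvCondB nurse m k := by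
      simp only [pvCondB, pvCond, hcnt]
    rw [hcond, pvSpecGo_succ]
    by_cases hcb : pvCondB nurse m k = true
    · simp only [if_pos hcb]
      refine Prod.ext ?_ rfl
      apply List.ext_getElem
      · simp
      · intro i h1 h2
        simp only [List.length_set, List.length_map, List.length_range] at h1
        simp only [List.getElem_set, List.getElem_map, List.getElem_range]
        by_cases hik : k = i
        · subst hik; simp [hcb]
        · rw [if_neg hik]
          congr 1
          simp only [eq_iff_iff]
          constructor <;> rintro ⟨h, h2⟩
          · exact ⟨by omega, h2⟩
          · refine ⟨?_, h2⟩
            rcases Nat.lt_succ_iff_lt_or_eq.mp h with h3 | h3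
            · exact h3
            · exact absurd h3 (by omega)
    · simp only [if_neg hcb]
      refine Prod.ext ?_ ?_
      · show _ = (List.range n).map (fun j => if j < k + 1 ∧ pvCondB nurse m j = true then "M" else "R")
        apply List.ext_getElem
        · simp
        · intro i h1 h2
          simp only [List.getElem_map, List.getElem_range]
          congr 1
          simp only [eq_iff_iff]
          constructor <;> rintro ⟨h, h2⟩
          · exact ⟨by omega, h2⟩
          · refine ⟨?_, h2⟩
            rcases Nat.lt_succ_iff_lt_or_eq.mp h with h3 | h3
            · exact h3
            · exact absurd (h3 ▸ h2) hcb
      · show _ = (_ : _ × _ × _ × _).2.1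
        split_ifs <;> rfl

-- the final first-pass array
def pvM1 (nurse : List String) (m : Int) (n : Nat) : List String :=
  (List.range n).map (fun j => if pvCondB nurse m j then "M" else "R")

-- A's second pass tracked against the reference recursion.
lemma pvA2 (nurse : List String) (m a e : Int) (n k : Nat) (hk : k ≤ n) :
    (List.range k).foldl (fun (st : List String × Int × Int) (j : Nat) =>
      if st.1.getD j "" == "R" then
        if st.2.1 < e then (st.1.set j "E", st.2.1 + 1, st.2.2)
        else if st.2.2 < a then (st.1.set j "A", st.2.1, st.2.2 + 1)
        else st
      else st) (pvM1 nurse m n, 0, 0)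
    = ((pvSpecGo nurse m a e k).1 ++ (pvM1 nurse m n).drop k,
       (pvSpecGo nurse m a e k).2.2.1, (pvSpecGo nurse m a e k).2.2.2) := by
  induction k with
  | zero => simp [pvSpecGo]
  | succ k ih =>
    rw [List.range_succ, List.foldl_append, ih (by omega)]
    simp only [List.foldl_cons, List.foldl_nil]
    have hkn : k < n := by omega
    have hklen : k < (pvM1 nurse m n).length := by simp [pvM1]; omega
    have hlen : (pvSpecGo nurse m a e k).1.length = k := pvSpecGo_len nurse m a e k
    have hdrop : (pvM1 nurse m n).drop k
        = (if pvCondB nurse m k then "M" else "R") :: (pvM1 nurse m n).drop (k+1) := by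
      rw [List.drop_eq_getElem_cons hklen]
      congr 1
      simp [pvM1, hkn]
    have hget : ((pvSpecGo nurse m a e k).1 ++ (pvM1 nurse m n).drop k).getD k ""
        = (if pvCondB nurse m k then "M" else "R") := by
      rw [hdrop, List.getD_eq_getElem?_getD, List.getElem?_append_right (by omega)]
      simp [hlen]
    rw [hget, pvSpecGo_succ]
    by_cases hcb : pvCondB nurse m k = true
    · -- slot k is "M": pass 2 skips it, B appends "M"
      simp only [if_pos hcb] at hdrop ⊢
      rw [hdrop]
      rw [if_neg (by decide : ¬ (("M" == "R") = true))]
      refine Prod.ext ?_ rfl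
      rw [List.append_assoc]
      rfl
    · simp only [if_neg hcb] at hdrop ⊢
      rw [hdrop]
      rw [if_pos (by decide : (("R" == "R") = true))]
      by_cases he : (pvSpecGo nurse m a e k).2.2.1 < e
      · simp only [if_pos he]
        refine Prod.ext ?_ rfl
        show ((pvSpecGo nurse m a e k).1 ++ "R" :: (pvM1 nurse m n).drop (k+1)).set k "E" = _
        have h := pv_set_append_len (pvSpecGo nurse m a e k).1 "R" ((pvM1 nurse m n).drop (k+1)) "E"
        rw [hlen] at h
        rw [h]
        simp
      · simp only [if_neg he]
        by_cases ha : (pvSpecGo nurse m a e k).2.2.2 < a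
        · simp only [if_pos ha]
          refine Prod.ext ?_ rfl
          show ((pvSpecGo nurse m a e k).1 ++ "R" :: (pvM1 nurse m n).drop (k+1)).set k "A" = _
          have h := pv_set_append_len (pvSpecGo nurse m a e k).1 "R" ((pvM1 nurse m n).drop (k+1)) "A"
          rw [hlen] at h
          rw [h]
          simp
        · simp only [if_neg ha]
          refine Prod.ext ?_ rfl
          simp

-- ===== VERDICT (by name: the statement is the Claim_ definition above) =====
theorem generate_nonConflict_nurse_spec : Claim_equal_generate_nonConflict_nurse := by
  intro nurse N m a e _hdom hpre
  unfold Spec_generate_nonConflict_nurse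
  simp only [generate_nonConflict_nurse, generate_nonConflict_nurse_alt]
  rw [PySem.List.pyRange_zero]
  set n := N.toNat with hn
  have hnlen : n ≤ nurse.length := by
    unfold Pre_generate_nonConflict_nurse at hpre
    omega
  rw [List.foldl_map, List.foldl_map, List.foldl_map, List.map_map]
  simp only [PySem.List.pyGetD_natCast, PySem.List.pySetD_natCast, Function.comp]
  have hB := pvB_eq nurse m a e n
  have hA1 := pvA1 nurse m a e n n le_rfl
  have hA2 := pvA2 nurse m a e n n le_rfl
  have hM1 : (List.range n).map (fun j => if j < n ∧ pvCondB nurse m j = true then "M" else "R")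
      = pvM1 nurse m n := by
    unfold pvM1
    apply List.ext_getElem
    · simp
    · intro i h1 h2
      simp only [List.getElem_map, List.getElem_range]
      simp only [List.length_map, List.length_range] at h1
      congr 1
      simp only [eq_iff_iff]
      exact ⟨fun h => h.2, fun h => ⟨h1, h⟩⟩
  rw [hM1] at hA1
  simp only [Function.comp_def, hA1, hB, hA2]
  rw [List.drop_eq_nil_of_le (by simp [pvM1])]
  simp
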